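-- pv_equiv track=rewrite | github.com/suyash1798/DSA | Counting/Integers-With-Multiple-Sum-of-Two-Cubes.py | findGoodIntegers
-- ===== SOURCE A (Python) =====
-- def findGoodIntegers(n: int) -> list[int]:
--     upper = int(n ** (1 / 3)) + 1
--     last = set()
--     output = set()
--
--     for i in range(upper + 1):
--         for j in range(i, upper + 1):
--             x = i**3 + j**3
--
--             if x in last and x <= n:
--                 output.add(x)
--
--             last.add(x)
--
--     output = list(output)
--     output.sort()
--
--     return output
-- ===== SOURCE B (Python) =====
-- def findGoodIntegers(n: int) -> list[int]:
--     # exact integer cube root (avoids the float rounding of n ** (1/3))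
--     r = 0
--     while (r + 1) ** 3 <= n:
--         r += 1
--     upper = r + 1
--     # generate every two-cube sum and SORT them: a value with >= 2 representations
--     # then forms a run of adjacent equal entries in the sorted list
--     sums = sorted(i ** 3 + j ** 3 for i in range(upper + 1) for j in range(i, upper + 1))
--     # single scan over the sorted list: emit the head of each run of length >= 2 (if <= n),
--     # then skip the run; output is produced already in increasing order, no set needed
--     out = []
--     k, m = 0, len(sums)
--     while k + 1 < m:
--         x = sums[k]
--         if sums[k + 1] == x:
--             if x <= n:
--                 out.append(x)
--             while k < m and sums[k] == x:
--                 k += 1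
--         else:
--             k += 1
--     return out
-- ===== Notes on version B (the rewrite author's own statement) =====
-- stated objective: alternative
-- what changed: B replaces A's inline seen-before/output set bookkeeping with sort-then-scan: it generates all two-cube sums into a list, sorts it once (using an exact integer cube root for the bound), and a single linear scan emits the head of each adjacent-duplicate run (if <= n), producing the result already in increasing order with no sets at all.
import Mathlib
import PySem

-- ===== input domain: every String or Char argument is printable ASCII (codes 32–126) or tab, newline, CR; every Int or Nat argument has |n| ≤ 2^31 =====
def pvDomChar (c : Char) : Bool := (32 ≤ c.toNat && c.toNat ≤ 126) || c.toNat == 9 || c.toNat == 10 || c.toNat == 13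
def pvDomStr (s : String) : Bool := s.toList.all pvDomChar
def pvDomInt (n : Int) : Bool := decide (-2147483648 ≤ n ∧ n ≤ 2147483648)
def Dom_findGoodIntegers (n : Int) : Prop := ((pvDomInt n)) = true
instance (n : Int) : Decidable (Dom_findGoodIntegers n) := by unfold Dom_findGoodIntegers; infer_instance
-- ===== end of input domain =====

-- B replaces A's seen-before/output set bookkeeping with sort-then-scan: it sorts all
-- two-cube sums once and emits each adjacent-duplicate run head in a single linear scan.

-- ===== PORT A =====
-- Hand-port of `int(n ** (1/3)) + 1`, which PySem (no floats) cannot express: this loop returns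
-- the exact ⌊n^(1/3)⌋ for 0 ≤ n (fuel 2000 suffices on Dom: ⌊(2^31)^(1/3)⌋ = 1290 < 2000).
-- For 0 ≤ n ≤ 2^31 the Python float expression `int(n ** (1/3))` differs from ⌊n^(1/3)⌋ by at
-- most ±1, and the function's RETURN value is the same for every upper ≥ ⌊n^(1/3)⌋ (every sum
-- i³+j³ ≤ n already has j ≤ ⌊n^(1/3)⌋; larger j give sums > n, filtered out) — so this port is
-- exact in the return value on the admitted inputs.
def pyIcbrtLoop (n : Int) : Nat → Int → Int
  | 0, r => r
  | Nat.succ f, r => if (r + 1) ^ 3 ≤ n then pyIcbrtLoop n f (r + 1) else r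

-- body of A's inner loop on the state (last, output); x = i**3 + j**3
def stepA (n : Int) (st : PySem.Set Int × PySem.Set Int) (x : Int) :
    PySem.Set Int × PySem.Set Int :=
  let output := if st.1.contains x && decide (x ≤ n) then PySem.Set.add st.2 x else st.2
  let last := PySem.Set.add st.1 x
  (last, output)

def findGoodIntegers (n : Int) : List Int :=
  let upper : Int := pyIcbrtLoop n 2000 0 + 1       -- upper = int(n ** (1/3)) + 1 (see comment above)
  let st :=
    (PySem.List.pyRange 0 (upper + 1) 1).foldl (fun st i =>
      (PySem.List.pyRange i (upper + 1) 1).foldl (fun st j => stepA n st (i ^ 3 + j ^ 3)) st)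
      (PySem.Set.empty, PySem.Set.empty)            -- (last, output)
  PySem.List.sorted st.2 (fun x => x) false         -- output = list(output); output.sort()

-- ===== PORT B =====
-- Source B's scan loop over the sorted list, as recursion on the unscanned suffix:
-- a run head `x` with a duplicate right after it is emitted (if x ≤ n) and the inner
-- `while sums[k] == x: k += 1` run-skip is the dropWhile; otherwise advance by one.
def dupScan (n : Int) : List Int → List Int
  | [] => []
  | [_] => []
  | x :: y :: rest =>
      if h : x == y then
        (if x ≤ n then [x] else []) ++ dupScan n ((y :: rest).dropWhile (· == x))
      else
        dupScan n (y :: rest)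
termination_by s => s.length
decreasing_by
  · have hyx : (y == x) = true := by
      have := eq_of_beq h; simp [this]
    simp only [List.dropWhile, hyx]
    have := List.length_dropWhile_le (· == x) rest
    simp only [List.length_cons]; omega
  · simp

def findGoodIntegers_alt (n : Int) : List Int :=
  -- r = exact integer cube root: while (r+1)**3 <= n: r += 1  (fuel 2000: on Dom r ≤ 1290)
  let r : Int := pyIcbrtLoop n 2000 0
  let upper : Int := r + 1
  -- sums = sorted(i**3 + j**3 for i in range(upper+1) for j in range(i, upper+1))
  let sums :=
    PySem.List.sorted
      ((PySem.List.pyRange 0 (upper + 1) 1).flatMap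
        (fun i => (PySem.List.pyRange i (upper + 1) 1).map (fun j => i ^ 3 + j ^ 3)))
      (fun x => x) false
  -- one linear scan of the sorted list, emitting run heads in increasing order
  dupScan n sums

-- ===== PRECONDITION & SPEC =====
-- Pre_ excludes n < 0, where Python A raises TypeError (n ** (1/3) is a complex number there).
def Pre_findGoodIntegers (n : Int) : Prop := 0 ≤ n
instance (n : Int) : Decidable (Pre_findGoodIntegers n) := by unfold Pre_findGoodIntegers; infer_instance
def pvWitness_findGoodIntegers : Int := (1729)

def Spec_findGoodIntegers (n : Int) (out : List Int) : Prop := out = findGoodIntegers_alt n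
instance (n : Int) (out : List Int) : Decidable (Spec_findGoodIntegers n out) := by unfold Spec_findGoodIntegers; infer_instance

-- ===== CLAIM (what is proved, stated in full; the proofs are below) =====
def Claim_equal_findGoodIntegers : Prop := ∀ (n : Int), Dom_findGoodIntegers n → Pre_findGoodIntegers n → Spec_findGoodIntegers n (findGoodIntegers n)

-- ===== LEMMAS AND PROOFS =====

-- the multiset of two-cube sums both versions enumerate, for a given bound `upper`
def pvVals (upper : Int) : List Int :=
  (PySem.List.pyRange 0 (upper + 1) 1).flatMap
    (fun i => (PySem.List.pyRange i (upper + 1) 1).map (fun j => i ^ 3 + j ^ 3))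

-- a nested fold over the two ranges is a fold over pvVals (for any state type)
theorem pv_nested_foldl {σ : Type} (g : σ → Int → σ) (upper : Int) (init : σ) :
    (PySem.List.pyRange 0 (upper + 1) 1).foldl (fun s i =>
      (PySem.List.pyRange i (upper + 1) 1).foldl (fun s j => g s (i ^ 3 + j ^ 3)) s) init
    = (pvVals upper).foldl g init := by
  simp [pvVals, List.flatMap, List.foldl_flatten, List.foldl_map]

-- invariant of A's loop: output collects the y ≤ n seen at least twice
theorem stepA_mem (n : Int) (xs : List Int) : ∀ (l o : PySem.Set Int) (y : Int),
    y ∈ (xs.foldl (stepA n) (l, o)).2 ↔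
      y ∈ o ∨ (y ∈ l ∧ 1 ≤ xs.count y ∧ y ≤ n) ∨ (2 ≤ xs.count y ∧ y ≤ n) := by
  induction xs with
  | nil => intro l o y; simp
  | cons x t ih =>
    intro l o y
    rw [show (x :: t).foldl (stepA n) (l, o) = t.foldl (stepA n) (stepA n (l, o) x) from rfl]
    by_cases hc : (PySem.Set.contains l x && decide (x ≤ n)) = true
    · obtain ⟨hxl, hxn⟩ : x ∈ l ∧ x ≤ n := by
        simpa [PySem.Set.contains_iff] using hc
      have hstep : stepA n (l, o) x = (PySem.Set.add l x, PySem.Set.add o x) := by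
        simp [stepA]
        intro h
        exact absurd (h hxl) (by omega)
      rw [hstep, ih]
      by_cases hyx : x = y
      · subst hyx
        simp [PySem.Set.mem_add, hxl, hxn, List.count_cons]
      · have hyx' : ¬ y = x := fun h => hyx h.symm
        by_cases hyt : y ∈ t
        · simp [PySem.Set.mem_add, hyx, hyx', List.count_cons, hyt]
        · have hc0 : t.count y = 0 := List.count_eq_zero.mpr hyt
          simp [PySem.Set.mem_add, hyx, hyx', List.count_cons, hyt, hc0]
    · have hno : ¬ (x ∈ l ∧ x ≤ n) := by
        simpa [PySem.Set.contains_iff] using hc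
      have hstep : stepA n (l, o) x = (PySem.Set.add l x, o) := by
        simp [stepA]
        intro h1 h2
        exact (hno ⟨h1, h2⟩).elim
      rw [hstep, ih]
      by_cases hyx : x = y
      · subst hyx
        by_cases hyt : x ∈ t
        · have hc1 : 1 ≤ t.count x := List.count_pos_iff.mpr hyt
          by_cases hyn : x ≤ n
          · have hyl : x ∉ l := fun h => hno ⟨h, hyn⟩
            simp [PySem.Set.mem_add, hyt, hyn, hyl, List.count_cons]
          · simp [PySem.Set.mem_add, hyt, hyn, List.count_cons]
        · have hc0 : t.count x = 0 := List.count_eq_zero.mpr hyt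
          by_cases hyn : x ≤ n
          · have hyl : x ∉ l := fun h => hno ⟨h, hyn⟩
            simp [PySem.Set.mem_add, hyt, hyn, hyl, List.count_cons, hc0]
          · simp [PySem.Set.mem_add, hyt, hyn, List.count_cons, hc0]
      · have hyx' : ¬ y = x := fun h => hyx h.symm
        simp [PySem.Set.mem_add, hyx, hyx', List.count_cons]

theorem stepA_nodup (n : Int) (xs : List Int) : ∀ (l o : PySem.Set Int), o.Nodup →
    (xs.foldl (stepA n) (l, o)).2.Nodup := by
  induction xs with
  | nil => intro l o h; simpa using h
  | cons x t ih =>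
    intro l o h
    rw [show (x :: t).foldl (stepA n) (l, o) = t.foldl (stepA n) (stepA n (l, o) x) from rfl]
    apply ih
    simp only [stepA]
    split
    · exact PySem.Set.nodup_add o x h
    · exact h

-- the scan of a ≤-sorted list is strictly increasing and holds exactly the
-- values that occur at least twice and do not exceed n
theorem dupScan_spec (n : Int) : ∀ (m : Nat) (s : List Int), s.length ≤ m →
    s.Pairwise (· ≤ ·) →
    (dupScan n s).Pairwise (· < ·) ∧ ∀ y, y ∈ dupScan n s ↔ 2 ≤ s.count y ∧ y ≤ n := by
  intro m
  induction m with
  | zero =>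
    intro s hlen _
    have : s = [] := List.eq_nil_of_length_eq_zero (Nat.le_zero.mp hlen)
    subst this
    constructor
    · simp [dupScan]
    · intro y; simp [dupScan]
  | succ m ih =>
    intro s hlen hsort
    match s with
    | [] =>
      constructor
      · simp [dupScan]
      · intro y; simp [dupScan]
    | [x] =>
      constructor
      · simp [dupScan]
      · intro y
        simp only [dupScan, List.not_mem_nil, false_iff, List.count_singleton]
        intro ⟨h2, _⟩
        split_ifs at h2 <;> omega
    | x :: y :: rest =>
      have hx_le : ∀ z ∈ y :: rest, x ≤ z := by
        intro z hz
        exact (List.pairwise_cons.mp hsort).1 z hz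
      have htail : (y :: rest).Pairwise (· ≤ ·) := (List.pairwise_cons.mp hsort).2
      by_cases hxy : (x == y) = true
      · -- duplicate run at x
        have hxyeq : x = y := eq_of_beq hxy
        set t := (y :: rest).dropWhile (· == x) with ht
        have hsplit : y :: rest = (y :: rest).takeWhile (· == x) ++ t :=
          (List.takeWhile_append_dropWhile (p := (· == x)) (l := y :: rest)).symm
        have htw : ∀ z ∈ (y :: rest).takeWhile (· == x), z = x := by
          intro z hz
          have := List.mem_takeWhile_imp hz
          exact eq_of_beq this
        have ht_sub : t.Sublist (y :: rest) := List.dropWhile_sublist _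
        have ht_sort : t.Pairwise (· ≤ ·) := htail.sublist ht_sub
        have ht_len : t.length ≤ m := by
          have h1 : t.length ≤ (y :: rest).length := ht_sub.length_le
          -- t drops at least y (y == x holds), so it is shorter than y :: rest
          have hyx : (y == x) = true := by simp [hxyeq]
          have : t = rest.dropWhile (· == x) := by
            simp [ht, List.dropWhile, hyx]
          have h2 : t.length ≤ rest.length := by
            rw [this]; exact List.length_dropWhile_le _ _
          simp only [List.length_cons] at hlen
          omega
        have hx_not_t : x ∉ t := by
          intro hxt
          rcases htt : t with _ | ⟨a, t'⟩
          · rw [htt] at hxt; simp at hxt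
          · have hne : t ≠ [] := by rw [htt]; simp
            have hne' : (y :: rest).dropWhile (· == x) ≠ [] := ht ▸ hne
            have ha0 := List.head_dropWhile_not (· == x) hne'
            have hhead : ((y :: rest).dropWhile (· == x)).head hne' = a := by
              have : t.head hne = a := by simp [htt]
              simpa [ht] using this
            rw [hhead] at ha0
            have hax : a ≠ x := by simpa using ha0
            have hxa : x ≤ a := hx_le a (ht_sub.mem (htt ▸ List.mem_cons_self))
            rw [htt] at hxt
            rcases List.mem_cons.mp hxt with h | h
            · exact hax h.symm
            · have hat' : a ≤ x := by
                rw [htt] at ht_sort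
                exact (List.pairwise_cons.mp ht_sort).1 x h
              exact hax (le_antisymm hat' hxa)
        -- counts
        have hcount_x : 2 ≤ (x :: y :: rest).count x := by
          simp [List.count_cons, hxyeq]
        have hcount_ne : ∀ z, z ≠ x → (x :: y :: rest).count z = t.count z := by
          intro z hz
          have e1 : (x :: y :: rest).count z = (y :: rest).count z :=
            List.count_cons_of_ne (Ne.symm hz)
          have e2 : (y :: rest).count z
              = ((y :: rest).takeWhile (· == x)).count z + t.count z := by
            conv_lhs => rw [hsplit]
            exact List.count_append ..
          have htw0 : ((y :: rest).takeWhile (· == x)).count z = 0 :=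
            List.count_eq_zero.mpr (fun hmem => hz (htw z hmem))
          omega
        have hcount_x_t : t.count x = 0 := List.count_eq_zero.mpr hx_not_t
        obtain ⟨ihp, ihm⟩ := ih t ht_len ht_sort
        have hscan : dupScan n (x :: y :: rest)
            = (if x ≤ n then [x] else []) ++ dupScan n t := by
          rw [dupScan]
          simp [hxy, ht]
        constructor
        · rw [hscan]
          have hlt : ∀ z ∈ dupScan n t, x < z := by
            intro z hz
            have hc := (ihm z).mp hz
            have hzt : z ∈ t := List.count_pos_iff.mp (by omega)
            have hzrest : z ∈ y :: rest := ht_sub.mem hzt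
            have : x ≤ z := hx_le z hzrest
            have hne : z ≠ x := fun h => hx_not_t (h ▸ hzt)
            omega
          split_ifs
          · exact List.pairwise_cons.mpr ⟨hlt, ihp⟩
          · simpa using ihp
        · intro z
          rw [hscan]
          by_cases hzx : z = x
          · have hnot : z ∉ dupScan n t := by
              intro h
              have := (ihm z).mp h
              rw [hzx] at this
              omega
            constructor
            · intro hm
              rcases List.mem_append.mp hm with h | h
              · by_cases hn : x ≤ n
                · exact ⟨by rw [hzx]; exact hcount_x, by rw [hzx]; exact hn⟩
                · rw [if_neg hn] at h; simp at h
              · exact absurd h hnot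
            · rintro ⟨_, hn⟩
              have hn' : x ≤ n := by rw [← hzx]; exact hn
              apply List.mem_append_left
              rw [if_pos hn']
              simp [hzx]
          · have h1 : z ∉ (if x ≤ n then [x] else []) := by
              split_ifs <;> simp [hzx]
            simp only [List.mem_append]
            rw [ihm z, hcount_ne z hzx]
            constructor
            · rintro (h | h)
              · exact absurd h h1
              · exact h
            · intro h; right; exact h
      · -- x is unique (no adjacent duplicate): skip it
        have hxyne : x ≠ y := by simpa using hxy
        have hxy_lt : x < y := lt_of_le_of_ne (hx_le y (by simp)) hxyne
        have hx_not : x ∉ y :: rest := by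
          intro hmem
          rcases List.mem_cons.mp hmem with h | h
          · exact hxyne h
          · have hy_le : y ≤ x := (List.pairwise_cons.mp htail).1 x h
            omega
        have hlen' : (y :: rest).length ≤ m := by
          simp only [List.length_cons] at hlen ⊢; omega
        obtain ⟨ihp, ihm⟩ := ih (y :: rest) hlen' htail
        have hscan : dupScan n (x :: y :: rest) = dupScan n (y :: rest) := by
          rw [dupScan]; simp [hxy]
        constructor
        · rw [hscan]; exact ihp
        · intro z
          rw [hscan, ihm z]
          by_cases hzx : z = x
          · have h0 : (y :: rest).count z = 0 := by
              rw [hzx]; exact List.count_eq_zero.mpr hx_not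
            have h1 : (x :: y :: rest).count z = 1 := by
              rw [hzx, List.count_cons_self]
              rw [hzx] at h0
              omega
            rw [h0, h1]
            omega
          · have he : (x :: y :: rest).count z = (y :: rest).count z :=
              List.count_cons_of_ne (Ne.symm hzx)
            rw [he]

-- ===== VERDICT (by name: the statement is the Claim_ definition above) =====
theorem findGoodIntegers_spec : Claim_equal_findGoodIntegers := by
  unfold Claim_equal_findGoodIntegers Spec_findGoodIntegers
  intro n _ _
  unfold findGoodIntegers findGoodIntegers_alt
  dsimp only
  set upper : Int := pyIcbrtLoop n 2000 0 + 1 with hupper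
  rw [pv_nested_foldl (stepA n) upper (PySem.Set.empty, PySem.Set.empty)]
  set O := ((pvVals upper).foldl (stepA n) (PySem.Set.empty, PySem.Set.empty)).2 with hO
  set S := PySem.List.sorted (pvVals upper) (fun x => x) false with hS
  have hSperm : S.Perm (pvVals upper) := PySem.List.sorted_perm _ _ _
  have hSsort : S.Pairwise (· ≤ ·) := by
    have := PySem.List.sorted_pairwise (xs := pvVals upper) (key := fun x => x)
    simpa using this
  obtain ⟨hBp, hBm⟩ := dupScan_spec n S.length S (le_refl _) hSsort
  have hOm : ∀ y, y ∈ O ↔ 2 ≤ (pvVals upper).count y ∧ y ≤ n := by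
    intro y
    rw [hO, stepA_mem n (pvVals upper) PySem.Set.empty PySem.Set.empty y]
    simp [PySem.Set.empty]
  have hOnd : O.Nodup :=
    stepA_nodup n (pvVals upper) PySem.Set.empty PySem.Set.empty List.nodup_nil
  have hBnd : (dupScan n S).Nodup := hBp.imp (fun h => ne_of_lt h)
  have hperm : (dupScan n S).Perm O := by
    rw [List.perm_ext_iff_of_nodup hBnd hOnd]
    intro y
    rw [hBm y, hOm y, hSperm.count_eq]
  exact PySem.List.sorted_id_eq_of_perm_of_pairwise (xs := O) (ys := dupScan n S)
    hperm (hBp.imp fun h => le_of_lt h)
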